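-- pv_equiv track=rewrite | github.com/Ebenco36/MetaMP-Server | src/AI_Packages/TMProteinPredictor.py | _candidate_tmbed_batch_sizes
-- ===== SOURCE A (Python) =====
-- def _candidate_tmbed_batch_sizes(batch_size: int) -> list[int]:
--     start = max(1, int(batch_size or 1))
--     candidates = [start]
--     while start > 1:
--         start = max(1, start // 2)
--         candidates.append(start)
--         if start == 1:
--             break
--     return list(dict.fromkeys(candidates))
-- ===== SOURCE B (Python) =====
-- def _candidate_tmbed_batch_sizes(batch_size: int) -> list[int]:
--     start = max(1, int(batch_size or 1))
--     return [start >> i for i in range(start.bit_length())]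
-- ===== Notes on version B (the rewrite author's own statement) =====
-- stated objective: idiomatic
-- what changed: Replaces the sequential while-loop that mutates start, appends, and dedups via dict.fromkeys with a single comprehension producing each candidate independently as start >> i for i in range(start.bit_length()); the dedup pass disappears since the values are strictly decreasing.
import Mathlib
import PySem

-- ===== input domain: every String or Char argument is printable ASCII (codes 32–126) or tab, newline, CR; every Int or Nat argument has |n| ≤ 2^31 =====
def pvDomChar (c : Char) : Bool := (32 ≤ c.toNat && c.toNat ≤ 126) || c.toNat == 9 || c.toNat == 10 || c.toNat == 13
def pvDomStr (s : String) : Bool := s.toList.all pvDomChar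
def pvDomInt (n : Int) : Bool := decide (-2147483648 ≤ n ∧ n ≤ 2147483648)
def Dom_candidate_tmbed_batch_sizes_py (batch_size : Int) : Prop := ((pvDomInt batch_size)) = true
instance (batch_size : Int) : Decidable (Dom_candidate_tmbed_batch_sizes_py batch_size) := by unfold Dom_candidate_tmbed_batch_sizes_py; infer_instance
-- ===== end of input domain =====

-- B replaces A's sequential halving loop + dict.fromkeys dedup by an indexed comprehension
-- of bit-shifts whose length comes from bit_length (idiomatic; same cost).

-- ===== PORT A =====
-- the while-loop: mutates start, appends each new value, breaks on 1
def pvLoopA (start : Int) (candidates : List Int) : List Int :=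
  if _h : 1 < start then
    let s := max 1 (PySem.Int.floordiv start 2)
    if s = 1 then candidates ++ [s] else pvLoopA s (candidates ++ [s])
  else candidates
termination_by start.toNat
decreasing_by
  have h2 : PySem.Int.floordiv start 2 = start / 2 := PySem.Int.floordiv_eq_ediv_of_pos (by omega)
  simp only [h2]
  omega

def candidate_tmbed_batch_sizes_py (batch_size : Int) : List Int :=
  let start := max 1 (if batch_size = 0 then 1 else batch_size)
  PySem.List.dedup (pvLoopA start [start])

-- ===== PORT B =====
-- start >> i (Python int right shift; i : Nat from range)
def pvShift (s : Int) (i : Nat) : Int := s >>> i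

def candidate_tmbed_batch_sizes_py_alt (batch_size : Int) : List Int :=
  let start := max 1 (if batch_size = 0 then 1 else batch_size)
  (List.range (PySem.Int.bitLength start)).map (fun i => pvShift start i)

-- ===== PRECONDITION & SPEC =====
def Spec_candidate_tmbed_batch_sizes_py (batch_size : Int) (out : List Int) : Prop := out = candidate_tmbed_batch_sizes_py_alt batch_size
instance (batch_size : Int) (out : List Int) : Decidable (Spec_candidate_tmbed_batch_sizes_py batch_size out) := by unfold Spec_candidate_tmbed_batch_sizes_py; infer_instance

-- ===== CLAIM (what is proved, stated in full; the proofs are below) =====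
def Claim_equal_candidate_tmbed_batch_sizes_py : Prop := ∀ (batch_size : Int), Dom_candidate_tmbed_batch_sizes_py batch_size → Spec_candidate_tmbed_batch_sizes_py batch_size (candidate_tmbed_batch_sizes_py batch_size)

-- ===== LEMMAS AND PROOFS =====

-- B's candidate list, as a function of the (positive) start value
def pvShifts (s : Int) : List Int :=
  (List.range (PySem.Int.bitLength s)).map (fun i => pvShift s i)

theorem pvShifts_one : pvShifts 1 = [1] := by decide

theorem pv_shift_succ (m : Nat) (i : Nat) :
    ((m : Int)) >>> (i + 1) = ((m / 2 : Nat) : Int) >>> i := by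
  rw [← Int.natCast_shiftRight, ← Int.natCast_shiftRight]
  congr 1
  rw [Nat.add_comm, Nat.shiftRight_add, Nat.shiftRight_eq_div_pow m 1, pow_one]

theorem pvShifts_step {s : Int} (h : 2 ≤ s) :
    pvShifts s = s :: pvShifts (PySem.Int.floordiv s 2) := by
  have hbl : PySem.Int.bitLength s = PySem.Int.bitLength (PySem.Int.floordiv s 2) + 1 :=
    PySem.Int.bitLength_of_pos (by omega)
  obtain ⟨m, rfl⟩ := Int.eq_ofNat_of_zero_le (show (0:Int) ≤ s by omega)
  have hfd : PySem.Int.floordiv (m : Int) 2 = ((m / 2 : Nat) : Int) := by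
    exact_mod_cast PySem.Int.floordiv_natCast m 2
  unfold pvShifts
  rw [hbl, List.range_succ_eq_map, List.map_cons, List.map_map]
  refine congrArg₂ List.cons (by simp [pvShift]) (List.map_congr_left ?_)
  intro i _
  simp only [Function.comp_apply, pvShift, hfd]
  exact pv_shift_succ m i

-- the loop appends exactly the tail of B's list
theorem pvLoopA_eq : ∀ (n : Nat), ∀ s : Int, s.toNat = n → 2 ≤ s → ∀ acc,
    pvLoopA s acc = acc ++ pvShifts (PySem.Int.floordiv s 2) := by
  intro n
  induction n using Nat.strong_induction_on with
  | _ n ih =>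
    intro s hn hs acc
    have hfd : PySem.Int.floordiv s 2 = s / 2 := PySem.Int.floordiv_eq_ediv_of_pos (by omega)
    have h1 : 1 < s := by omega
    have hle : 1 ≤ s / 2 := by omega
    have hmax : max 1 (PySem.Int.floordiv s 2) = PySem.Int.floordiv s 2 := by
      rw [hfd]; omega
    rw [pvLoopA]
    simp only [h1, dif_pos, hmax]
    by_cases hone : PySem.Int.floordiv s 2 = 1
    · rw [if_pos hone, hone, pvShifts_one]
    · have hs2 : 2 ≤ PySem.Int.floordiv s 2 := by rw [hfd] at hone ⊢; omega
      rw [if_neg hone,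
        ih (PySem.Int.floordiv s 2).toNat (by rw [hfd]; omega) _ rfl hs2,
        pvShifts_step hs2]
      simp

-- within range, the shifts are strictly decreasing, hence all distinct
theorem pvShifts_nodup {s : Int} (hs : 1 ≤ s) : (pvShifts s).Nodup := by
  obtain ⟨m, rfl⟩ := Int.eq_ofNat_of_zero_le (show (0:Int) ≤ s by omega)
  have hm : 1 ≤ m := by exact_mod_cast hs
  have key : ∀ i j : Nat, i < j → j < PySem.Int.bitLength (m : Int) →
      pvShift (m : Int) j < pvShift (m : Int) i := by
    intro i j hij hj
    show pvShift (m : Int) j < pvShift (m : Int) i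
    have hpow : 2 ^ j ≤ m := by
      have h1 := PySem.Int.two_pow_bitLength_le (m : Int) (by exact_mod_cast Nat.one_le_iff_ne_zero.mp hm)
      have h2 : (2:Nat) ^ j ≤ 2 ^ (PySem.Int.bitLength (m : Int) - 1) :=
        Nat.pow_le_pow_right (by norm_num) (by omega)
      calc (2:Nat) ^ j ≤ 2 ^ (PySem.Int.bitLength (m : Int) - 1) := h2
        _ ≤ (m : Int).natAbs := h1
        _ = m := Int.natAbs_natCast m
    have hj1 : 1 ≤ m >>> j := by
      rw [Nat.shiftRight_eq_div_pow]
      exact (Nat.one_le_div_iff (Nat.two_pow_pos j)).mpr hpow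
    have hlt : m >>> j < m >>> i := by
      have : m >>> j = (m >>> i) >>> (j - i) := by
        rw [← Nat.shiftRight_add]; congr 1; omega
      have h2p : 1 < 2 ^ (j - i) := Nat.one_lt_two_pow_iff.mpr (by omega)
      have hpos : 0 < m >>> i := by
        have hle2 : m >>> j ≤ m >>> i := by
          rw [this, Nat.shiftRight_eq_div_pow]; exact Nat.div_le_self _ _
        omega
      rw [this, Nat.shiftRight_eq_div_pow]
      exact Nat.div_lt_self hpos h2p
    simp only [pvShift] at *
    rw [← Int.natCast_shiftRight, ← Int.natCast_shiftRight]
    exact_mod_cast hlt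
  unfold pvShifts
  refine List.Nodup.map_on ?_ (List.nodup_range)
  intro i hi j hj hfij
  simp only [List.mem_range] at hi hj
  by_contra hne
  rcases Nat.lt_or_ge i j with h | h
  · exact absurd hfij (by have := key i j h hj; omega)
  · exact absurd hfij.symm (by have := key j i (by omega) hi; omega)

-- PySem's dict.fromkeys dedup is the identity on duplicate-free lists
theorem pvSetAdd_of_nodup {α : Type} [BEq α] [LawfulBEq α] :
    ∀ (l acc : List α), (acc ++ l).Nodup →
      List.foldl PySem.Set.add acc l = acc ++ l := by
  intro l
  induction l with
  | nil => intro acc _; simp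
  | cons x xs ih =>
    intro acc hnd
    have hx : PySem.Set.contains acc x = false := by
      have hmem : x ∉ acc := by
        intro hmem
        have := List.disjoint_of_nodup_append hnd hmem
        simp at this
      simp [PySem.Set.contains, hmem]
    simp only [List.foldl_cons, PySem.Set.add, hx, Bool.false_eq_true, if_false]
    rw [ih (acc ++ [x]) (by simpa using hnd)]
    simp

theorem pvDedup_of_nodup {α : Type} [BEq α] [LawfulBEq α] (l : List α) (h : l.Nodup) :
    PySem.List.dedup l = l := by
  have := pvSetAdd_of_nodup l ([] : List α) (by simpa using h)
  simpa [PySem.List.dedup, PySem.Set.ofList, PySem.Set.empty] using this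

-- ===== VERDICT (by name: the statement is the Claim_ definition above) =====
theorem candidate_tmbed_batch_sizes_py_spec : Claim_equal_candidate_tmbed_batch_sizes_py := by
  intro batch_size _
  unfold Spec_candidate_tmbed_batch_sizes_py
  unfold candidate_tmbed_batch_sizes_py candidate_tmbed_batch_sizes_py_alt
  set start := max 1 (if batch_size = 0 then (1:Int) else batch_size) with hstart
  have h1 : 1 ≤ start := le_max_left _ _
  show PySem.List.dedup (pvLoopA start [start]) = pvShifts start
  rcases eq_or_lt_of_le h1 with heq | hlt
  · rw [← heq, pvShifts_one, pvLoopA]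
    norm_num
    decide
  · rw [pvLoopA_eq start.toNat start rfl (by omega) [start]]
    rw [List.singleton_append, ← pvShifts_step (by omega)]
    exact pvDedup_of_nodup _ (pvShifts_nodup h1)
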